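-- pv_equiv track=rewrite | github.com/tarnarut/huco_mrrobot | mrrobot.py | collect_stat
-- ===== SOURCE A (Python) =====
-- def collect_stat(keywords, phrases):
--         result = {}
--         for keyword in keywords:
--                 result[keyword] = 0
--                 for phrase in phrases:
--                         if (keyword in phrase):
--                                 result[keyword]+=1
--         return result
-- ===== SOURCE B (Python) =====
-- def collect_stat(keywords, phrases):
--     counts = dict.fromkeys(keywords, 0)
--     lens = {len(k) for k in counts}
--     kwset = set(counts)
--     for phrase in phrases:
--         matched = set()
--         for i in range(len(phrase) + 1):
--             for L in lens:
--                 window = phrase[i:i+L]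
--                 if len(window) == L and window in kwset:
--                     matched.add(window)
--         for k in matched:
--             counts[k] += 1
--     return counts
-- ===== Notes on version B (the rewrite author's own statement) =====
-- stated objective: faster
-- what changed: B scans each phrase once with a sliding window: it builds a hash set of the (deduplicated) keywords and the set of distinct keyword lengths, looks every window of a keyword length up in the keyword set, collects the per-phrase set of matched keywords and bumps their counts, instead of A's per-keyword substring rescan of every phrase.
import Mathlib
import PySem

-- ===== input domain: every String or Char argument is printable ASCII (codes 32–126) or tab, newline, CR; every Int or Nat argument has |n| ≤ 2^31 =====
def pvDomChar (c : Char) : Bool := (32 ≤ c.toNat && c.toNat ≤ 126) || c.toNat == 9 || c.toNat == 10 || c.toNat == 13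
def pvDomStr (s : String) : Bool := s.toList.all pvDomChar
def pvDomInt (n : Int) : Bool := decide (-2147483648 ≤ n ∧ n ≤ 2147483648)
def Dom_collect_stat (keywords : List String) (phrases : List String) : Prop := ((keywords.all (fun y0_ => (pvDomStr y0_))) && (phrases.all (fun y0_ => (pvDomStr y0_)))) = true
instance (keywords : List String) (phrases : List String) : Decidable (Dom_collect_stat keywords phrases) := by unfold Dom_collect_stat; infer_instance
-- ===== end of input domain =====

-- B replaces A's per-keyword rescan of all phrases by a sliding-window scan of each phrase: every window whose
-- length is a keyword length is looked up in a hash set of the keywords, and the per-phrase set of matched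
-- keywords is counted once — a different algorithm whose inner loop is over distinct keyword LENGTHS, not keywords.

-- ===== PORT A =====
def collect_stat (keywords : List String) (phrases : List String) : List (String × Int) :=
  (keywords.foldl (fun result keyword =>
      phrases.foldl (fun result phrase =>
          if PySem.Str.isIn keyword phrase then
            result.insert keyword (result.getD keyword 0 + 1)
          else result)
        (result.insert keyword 0))
    PySem.Dict.empty).items

-- ===== PORT B =====
def collect_stat_alt (keywords : List String) (phrases : List String) : List (String × Int) :=
  let counts := keywords.foldl (fun d k => d.insert k (0 : Int)) PySem.Dict.empty
  let lens : PySem.Set Int := PySem.Set.ofList (counts.keys.map (fun k => PySem.Str.len k))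
  let kwset : PySem.Set String := PySem.Set.ofList counts.keys
  (phrases.foldl (fun counts phrase =>
      let matched : PySem.Set String :=
        (PySem.List.pyRange 0 (PySem.Str.len phrase + 1) 1).foldl (fun m i =>
          lens.foldl (fun m L =>
            let window := PySem.Str.slice phrase (some i) (some (i + L))
            if PySem.Str.len window == L && decide (window ∈ kwset) then PySem.Set.add m window
            else m) m) PySem.Set.empty
      matched.foldl (fun c k => c.modify k 0 (· + 1)) counts)
    counts).items

-- ===== PRECONDITION & SPEC =====
def Spec_collect_stat (keywords : List String) (phrases : List String) (out : List (String × Int)) : Prop := out = collect_stat_alt keywords phrases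
instance (keywords : List String) (phrases : List String) (out : List (String × Int)) : Decidable (Spec_collect_stat keywords phrases out) := by unfold Spec_collect_stat; infer_instance

-- ===== CLAIM (what is proved, stated in full; the proofs are below) =====
def Claim_equal_collect_stat : Prop := ∀ (keywords : List String) (phrases : List String), Dom_collect_stat keywords phrases → Spec_collect_stat keywords phrases (collect_stat keywords phrases)

-- ===== LEMMAS AND PROOFS =====

-- the number of phrases containing k, as an Int
def pvCnt (phrases : List String) (k : String) : Int :=
  (phrases.countP (fun p => PySem.Str.isIn k p) : Nat)

-- B's per-phrase matched set, named for the proofs (defeq to the fold inside collect_stat_alt)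
def pvMatched (kwset : PySem.Set String) (lens : PySem.Set Int) (phrase : String) : PySem.Set String :=
  (PySem.List.pyRange 0 (PySem.Str.len phrase + 1) 1).foldl (fun m i =>
    lens.foldl (fun m L =>
      if PySem.Str.len (PySem.Str.slice phrase (some i) (some (i + L))) == L &&
         decide ((PySem.Str.slice phrase (some i) (some (i + L))) ∈ kwset) then
        PySem.Set.add m (PySem.Str.slice phrase (some i) (some (i + L)))
      else m) m) PySem.Set.empty

-- A's inner loop: starting from d.insert k c, it just accumulates the count onto c
theorem pvA_inner (k : String) (phrases : List String) (d : PySem.Dict String Int) (c : Int) :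
    phrases.foldl (fun r p => if PySem.Str.isIn k p then r.insert k (r.getD k 0 + 1) else r)
      (d.insert k c) = d.insert k (c + pvCnt phrases k) := by
  induction phrases generalizing c with
  | nil => simp [pvCnt]
  | cons p ps ih =>
    simp only [List.foldl_cons]
    by_cases h : PySem.Str.isIn k p = true
    · rw [if_pos h, PySem.Dict.getD_insert_self, PySem.Dict.insert_insert_self, ih]
      congr 1
      simp only [pvCnt, List.countP_cons, h, if_true]
      push_cast
      ring
    · rw [if_neg h, ih]
      congr 1
      simp only [pvCnt, List.countP_cons, h]
      push_cast
      ring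

-- a fold of inserts whose value depends only on the key
theorem pvFoldInsert_getD (l : List String) (f : String → Int) (d : PySem.Dict String Int) (v : String) :
    (l.foldl (fun d k => d.insert k (f k)) d).getD v 0 = if v ∈ l then f v else d.getD v 0 := by
  induction l generalizing d with
  | nil => simp
  | cons k ks ih =>
    simp only [List.foldl_cons, ih, List.mem_cons]
    by_cases hm : v ∈ ks
    · simp [hm]
    · by_cases he : v = k
      · simp [he, PySem.Dict.getD_insert_self]
      · simp [hm, he, PySem.Dict.getD_insert_of_ne _ _ _ he]

-- membership in a fold whose step either keeps m or adds one element determined by the item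
theorem pvMemFold {α β : Type} (xs : List β) (step : List α → β → List α)
    (P : β → Prop) (v : α) (h : ∀ m x, v ∈ step m x ↔ v ∈ m ∨ P x) :
    ∀ m, v ∈ xs.foldl step m ↔ v ∈ m ∨ ∃ x ∈ xs, P x := by
  induction xs with
  | nil => simp
  | cons x xs ih =>
    intro m
    simp only [List.foldl_cons, ih, h, List.exists_mem_cons_iff]
    tauto

theorem pvNodupFold {α β : Type} (xs : List β) (step : List α → β → List α)
    (h : ∀ m x, m.Nodup → (step m x).Nodup) :
    ∀ m, m.Nodup → (xs.foldl step m).Nodup := by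
  induction xs with
  | nil => intro m hm; simpa using hm
  | cons x xs ih =>
    intro m hm
    exact ih _ (h m x hm)

theorem pvMatched_nodup (kwset : PySem.Set String) (lens : PySem.Set Int) (phrase : String) :
    (pvMatched kwset lens phrase).Nodup := by
  unfold pvMatched
  apply pvNodupFold
  · intro m i hm
    apply pvNodupFold
    · intro m L hmm
      split_ifs with h
      · exact PySem.Set.nodup_add _ _ hmm
      · exact hmm
    · exact hm
  · exact List.nodup_nil

-- the matched set is exactly the keywords occurring in the phrase
theorem pvMatched_mem (kwset : PySem.Set String) (lens : PySem.Set Int) (phrase : String)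
    (hlen : ∀ L ∈ lens, ∃ k ∈ kwset, PySem.Str.len k = L)
    (hlen' : ∀ k ∈ kwset, PySem.Str.len k ∈ lens) (v : String) :
    v ∈ pvMatched kwset lens phrase ↔ v ∈ kwset ∧ PySem.Str.isIn v phrase = true := by
  unfold pvMatched
  rw [pvMemFold _ _
      (fun i => ∃ L ∈ lens,
        (PySem.Str.len (PySem.Str.slice phrase (some i) (some (i + L))) == L &&
         decide ((PySem.Str.slice phrase (some i) (some (i + L))) ∈ kwset)) = true ∧
        v = PySem.Str.slice phrase (some i) (some (i + L))) v
      (fun m i => pvMemFold _ _ _ v (fun m L => by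
        split_ifs with h
        · rw [PySem.Set.mem_add]
          constructor
          · rintro (hm | he)
            · exact Or.inl hm
            · exact Or.inr ⟨h, he⟩
          · rintro (hm | ⟨_, he⟩)
            · exact Or.inl hm
            · exact Or.inr he
        · constructor
          · exact Or.inl
          · rintro (hm | ⟨hg, _⟩)
            · exact hm
            · exact absurd hg h) m)]
  simp only [PySem.Set.empty, List.not_mem_nil, false_or]
  constructor
  · rintro ⟨i, hi, L, hL, hg, hv⟩
    rw [Bool.and_eq_true, decide_eq_true_eq] at hg
    subst hv
    refine ⟨hg.2, ?_⟩
    -- the window is a slice, hence an infix of the phrase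
    obtain ⟨hi0, _⟩ := PySem.List.mem_pyRange_one.mp hi
    obtain ⟨k, _, hkL⟩ := hlen L hL
    have hL0 : 0 ≤ L := by
      rw [← hkL]; simp [PySem.Str.len_eq]
    rw [PySem.Str.isIn_iff_infix, PySem.Str.toList_slice]
    simp only [PySem.Chars.slice_eq_listSlice]
    rw [PySem.List.slice_toNat phrase.toList hi0 (by omega)]
    exact ((List.take_prefix _ _).isInfix).trans ((List.drop_suffix _ _).isInfix)
  · rintro ⟨hvk, hvin⟩
    rw [PySem.Str.isIn_iff_infix] at hvin
    obtain ⟨s, t, hst⟩ := hvin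
    have hwin : (PySem.Str.slice phrase (some (s.length : Int))
        (some ((s.length : Int) + (v.toList.length : Int)))).toList = v.toList := by
      rw [PySem.Str.toList_slice]
      simp only [PySem.Chars.slice_eq_listSlice]
      rw [PySem.List.slice_natCast_add]
      rw [← hst, List.append_assoc, List.drop_left, List.take_left]
    have hveq : PySem.Str.slice phrase (some (s.length : Int))
        (some ((s.length : Int) + (v.toList.length : Int))) = v := String.toList_inj.mp hwin
    refine ⟨(s.length : Int), ?_, (v.toList.length : Int), ?_, ?_, hveq.symm⟩
    · rw [PySem.List.mem_pyRange_one]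
      refine ⟨Int.natCast_nonneg _, ?_⟩
      have hsl : s.length ≤ phrase.toList.length := by
        rw [← hst]; simp [List.length_append]
      have hlp : PySem.Str.len phrase = (phrase.toList.length : Int) := PySem.Str.len_eq phrase
      omega
    · have := hlen' v hvk
      rwa [PySem.Str.len_eq] at this
    · rw [Bool.and_eq_true, decide_eq_true_eq, hveq]
      exact ⟨by rw [PySem.Str.len_eq]; exact beq_self_eq_true _, hvk⟩

-- applying the matched set: a fold of modify over a Nodup list of present keys
theorem pvApply (ks : List String) (d : PySem.Dict String Int)
    (hnd : ks.Nodup) (hmem : ∀ k ∈ ks, d.contains k = true) :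
    (ks.foldl (fun c k => c.modify k 0 (· + 1)) d).keys = d.keys ∧
    ∀ v, (ks.foldl (fun c k => c.modify k 0 (· + 1)) d).getD v 0
        = d.getD v 0 + (if v ∈ ks then 1 else 0) := by
  induction ks generalizing d with
  | nil => simp
  | cons k ks ih =>
    have hk : d.contains k = true := hmem k (List.mem_cons_self ..)
    have hkeys : (d.modify k 0 (· + 1)).keys = d.keys := by
      rw [PySem.Dict.keys_modify, PySem.Dict.keys_insert_of_contains _ _ hk]
    have hmem1 : ∀ x ∈ ks, (d.modify k 0 (· + 1)).contains x = true := by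
      intro x hx
      rw [PySem.Dict.contains_iff_mem_keys, hkeys, ← PySem.Dict.contains_iff_mem_keys]
      exact hmem x (List.mem_cons_of_mem _ hx)
    have hknotin : k ∉ ks := (List.nodup_cons.mp hnd).1
    obtain ⟨ihk, ihg⟩ := ih (d.modify k 0 (· + 1)) hnd.of_cons hmem1
    constructor
    · rw [List.foldl_cons, ihk, hkeys]
    · intro v
      rw [List.foldl_cons, ihg v, PySem.Dict.getD_modify]
      by_cases he : v = k
      · subst he
        simp [hknotin]
      · simp [he, List.mem_cons]

-- B's outer loop over the phrases
theorem pvB_outer (kwset : PySem.Set String) (lens : PySem.Set Int) (phrases : List String)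
    (hlen : ∀ L ∈ lens, ∃ k ∈ kwset, PySem.Str.len k = L)
    (hlen' : ∀ k ∈ kwset, PySem.Str.len k ∈ lens)
    (d : PySem.Dict String Int) (hsub : ∀ k ∈ kwset, d.contains k = true) :
    (phrases.foldl (fun c ph => (pvMatched kwset lens ph).foldl (fun c k => c.modify k 0 (· + 1)) c) d).keys = d.keys ∧
    ∀ v, (phrases.foldl (fun c ph => (pvMatched kwset lens ph).foldl (fun c k => c.modify k 0 (· + 1)) c) d).getD v 0
        = d.getD v 0 + (if v ∈ kwset then pvCnt phrases v else 0) := by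
  induction phrases generalizing d with
  | nil => simp [pvCnt]
  | cons ph ps ih =>
    have hmm : ∀ k ∈ pvMatched kwset lens ph, d.contains k = true := by
      intro k hkm
      exact hsub k ((pvMatched_mem kwset lens ph hlen hlen' k).mp hkm).1
    obtain ⟨hk1, hg1⟩ := pvApply (pvMatched kwset lens ph) d (pvMatched_nodup kwset lens ph) hmm
    set d1 := (pvMatched kwset lens ph).foldl (fun c k => c.modify k 0 (· + 1)) d with hd1
    have hsub1 : ∀ k ∈ kwset, d1.contains k = true := by
      intro k hk
      rw [PySem.Dict.contains_iff_mem_keys, hk1, ← PySem.Dict.contains_iff_mem_keys]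
      exact hsub k hk
    obtain ⟨ihk, ihg⟩ := ih d1 hsub1
    constructor
    · rw [List.foldl_cons, ← hd1, ihk, hk1]
    · intro v
      rw [List.foldl_cons, ← hd1, ihg v, hg1 v]
      have hmv : v ∈ pvMatched kwset lens ph ↔ v ∈ kwset ∧ PySem.Str.isIn v ph = true :=
        pvMatched_mem kwset lens ph hlen hlen' v
      by_cases hm : v ∈ kwset
      · by_cases hp : PySem.Str.isIn v ph = true
        · rw [if_pos (hmv.mpr ⟨hm, hp⟩)]
          have hp' : PySem.Chars.isIn v.toList ph.toList = true := by simpa using hp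
          have hc : (ph :: ps).countP (fun p => PySem.Str.isIn v p)
              = ps.countP (fun p => PySem.Str.isIn v p) + 1 := by
            simp [hp']
          simp only [hm, if_true, pvCnt, hc]
          push_cast
          ring
        · rw [if_neg (fun hc => hp (hmv.mp hc).2)]
          have hp' : PySem.Chars.isIn v.toList ph.toList = false := by simpa using hp
          have hc : (ph :: ps).countP (fun p => PySem.Str.isIn v p)
              = ps.countP (fun p => PySem.Str.isIn v p) := by
            simp [hp']
          simp only [hm, if_true, pvCnt, hc]
          ring
      · rw [if_neg (fun hc => hm (hmv.mp hc).1)]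
        simp [hm]

-- the two ports agree on every input
theorem pvMain (keywords phrases : List String) :
    collect_stat keywords phrases = collect_stat_alt keywords phrases := by
  simp only [collect_stat, collect_stat_alt]
  have hfun : (fun (result : PySem.Dict String Int) (keyword : String) =>
      phrases.foldl (fun result phrase => if PySem.Str.isIn keyword phrase then
          result.insert keyword (result.getD keyword 0 + 1) else result) (result.insert keyword 0))
      = fun d k => d.insert k (pvCnt phrases k) := by
    funext d k
    rw [pvA_inner, zero_add]
  rw [hfun]
  set SA := keywords.foldl (fun d k => d.insert k (pvCnt phrases k)) PySem.Dict.empty with hSA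
  set C := keywords.foldl (fun d k => d.insert k (0 : Int)) PySem.Dict.empty with hC
  have hCkeys : C.keys = PySem.Set.ofList keywords := by
    rw [hC, PySem.Dict.keys_foldl_insert (f := fun _ _ => (0 : Int))]
    simp [PySem.Set.update_nil_left]
  have hAkeys : SA.keys = PySem.Set.ofList keywords := by
    rw [hSA, PySem.Dict.keys_foldl_insert (f := fun _ k => pvCnt phrases k)]
    simp [PySem.Set.update_nil_left]
  have hCnd : C.keys.Nodup := by rw [hCkeys]; exact PySem.Set.nodup_ofList keywords
  have hAnd : SA.keys.Nodup := by rw [hAkeys]; exact PySem.Set.nodup_ofList keywords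
  set lens : PySem.Set Int := PySem.Set.ofList (C.keys.map (fun k => PySem.Str.len k)) with hlensdef
  set kwset : PySem.Set String := PySem.Set.ofList C.keys with hkwdef
  have hkw : kwset = C.keys := PySem.Set.ofList_eq_self_of_nodup _ hCnd
  have hlen : ∀ L ∈ lens, ∃ k ∈ kwset, PySem.Str.len k = L := by
    intro L hL
    rw [hlensdef, PySem.Set.mem_ofList, List.mem_map] at hL
    obtain ⟨k, hk, hkL⟩ := hL
    exact ⟨k, by rw [hkw]; exact hk, hkL⟩
  have hlen' : ∀ k ∈ kwset, PySem.Str.len k ∈ lens := by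
    intro k hk
    rw [hlensdef, PySem.Set.mem_ofList, List.mem_map]
    exact ⟨k, by rw [← hkw]; exact hk, rfl⟩
  have hsub : ∀ k ∈ kwset, C.contains k = true := by
    intro k hk
    rw [PySem.Dict.contains_iff_mem_keys, ← hkw]
    exact hk
  have hbody : (fun (counts : PySem.Dict String Int) (phrase : String) =>
        (pvMatched kwset lens phrase).foldl (fun c k => c.modify k 0 (· + 1)) counts)
      = fun counts phrase =>
        ((PySem.List.pyRange 0 (PySem.Str.len phrase + 1) 1).foldl (fun m i =>
          lens.foldl (fun m L =>
            if PySem.Str.len (PySem.Str.slice phrase (some i) (some (i + L))) == L &&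
               decide ((PySem.Str.slice phrase (some i) (some (i + L))) ∈ kwset) then
              PySem.Set.add m (PySem.Str.slice phrase (some i) (some (i + L)))
            else m) m) PySem.Set.empty).foldl (fun c k => c.modify k 0 (· + 1)) counts := rfl
  obtain ⟨hFk, hFg⟩ := pvB_outer kwset lens phrases hlen hlen' C hsub
  rw [← hbody] at *
  set F := phrases.foldl (fun c ph => (pvMatched kwset lens ph).foldl (fun c k => c.modify k 0 (· + 1)) c) C with hF
  have hFnd : F.keys.Nodup := by rw [hFk]; exact hCnd
  rw [PySem.Dict.items_eq_map_keys SA hAnd 0, PySem.Dict.items_eq_map_keys F hFnd 0, hFk, hAkeys, hCkeys]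
  apply List.map_congr_left
  intro k hk
  have hkm : k ∈ keywords := (PySem.Set.mem_ofList keywords k).mp hk
  have hkC : k ∈ C.keys := by rw [hCkeys]; exact (PySem.Set.mem_ofList keywords k).mpr hkm
  have hCg : C.getD k 0 = 0 := by
    rw [hC, pvFoldInsert_getD, if_pos hkm]
  have h1 : SA.getD k 0 = pvCnt phrases k := by
    rw [hSA, pvFoldInsert_getD, if_pos hkm]
  have h2 : F.getD k 0 = pvCnt phrases k := by
    rw [hFg k, hCg, if_pos (by rw [hkw]; exact hkC), zero_add]
  rw [h1, h2]

-- ===== VERDICT (by name: the statement is the Claim_ definition above) =====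
theorem collect_stat_spec : Claim_equal_collect_stat := by
  intro keywords phrases _
  unfold Spec_collect_stat
  exact pvMain keywords phrases
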